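-- pv_equiv track=rewrite | github.com/ivanxma/HeatWave_Demo | pages/heatwave_lh_external.py | _resolve_selected_object_folder
-- ===== SOURCE A (Python) =====
-- def _normalize_text(value):
--     return str(value or "").strip()
--
-- def _build_object_storage_base_uri(config_values, folder_name=""):
--     bucket_name = _normalize_text(config_values.get("bucket_name"))
--     namespace_name = _normalize_text(config_values.get("namespace_name"))
--     folder_value = _normalize_text(folder_name).strip("/")
--     if not bucket_name or not namespace_name:
--         return ""
--     if folder_value:
--         return "oci://{}@{}/{}/".format(bucket_name, namespace_name, folder_value)
--     return "oci://{}@{}/".format(bucket_name, namespace_name)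
--
-- def _resolve_selected_object_folder(form_state, config_values, folder_options):
--     selected_folder = _normalize_text(form_state.get("selected_object_folder")).strip("/")
--     if selected_folder:
--         return selected_folder
--     oci_uri = _normalize_text(form_state.get("oci_uri"))
--     base_uri = _build_object_storage_base_uri(config_values, "")
--     if base_uri and oci_uri.startswith(base_uri):
--         uri_path = oci_uri[len(base_uri):].strip("/")
--         ordered_options = sorted(folder_options, key=len, reverse=True)
--         for folder_option in ordered_options:
--             if uri_path == folder_option or uri_path.startswith(folder_option + "/"):
--                 return folder_option
--     configured_prefix = _normalize_text(config_values.get("base_folder")).strip("/")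
--     if configured_prefix:
--         return configured_prefix
--     return folder_options[0] if folder_options else ""
-- ===== SOURCE B (Python) =====
-- def _text(value):
--     return str(value or "").strip()
--
--
-- def _trim(value):
--     return _text(value).strip("/")
--
--
-- def _base_uri(config_values):
--     bucket = _text(config_values.get("bucket_name"))
--     namespace = _text(config_values.get("namespace_name"))
--     return "oci://{}@{}/".format(bucket, namespace) if bucket and namespace else ""
--
--
-- def _match_from_uri(form_state, config_values, folder_options):
--     base = _base_uri(config_values)
--     uri = _text(form_state.get("oci_uri"))
--     if not base or not uri.startswith(base):
--         return None
--     path = uri[len(base):].strip("/")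
--     matches = [f for f in folder_options
--                if path == f or path.startswith(f + "/")]
--     return max(matches, key=len) if matches else None
--
--
-- def _resolve_selected_object_folder(form_state, config_values, folder_options):
--     for candidate in (
--         _trim(form_state.get("selected_object_folder")) or None,
--         _match_from_uri(form_state, config_values, folder_options),
--         _trim(config_values.get("base_folder")) or None,
--         folder_options[0] if folder_options else "",
--     ):
--         if candidate is not None:
--             return candidate
--     return ""
-- ===== Notes on version B (the rewrite author's own statement) =====
-- stated objective: alternative
-- what changed: B recasts A's early-return cascade as a first-non-None candidate chain (selected folder, URI match, configured prefix, first option) and replaces the sorted-by-length-descending + first-match scan over folder_options by a list-comprehension filter followed by max(key=len), whose first-maximal rule reproduces the stable sort's tie-break; no ordering is ever built.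
import Mathlib
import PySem

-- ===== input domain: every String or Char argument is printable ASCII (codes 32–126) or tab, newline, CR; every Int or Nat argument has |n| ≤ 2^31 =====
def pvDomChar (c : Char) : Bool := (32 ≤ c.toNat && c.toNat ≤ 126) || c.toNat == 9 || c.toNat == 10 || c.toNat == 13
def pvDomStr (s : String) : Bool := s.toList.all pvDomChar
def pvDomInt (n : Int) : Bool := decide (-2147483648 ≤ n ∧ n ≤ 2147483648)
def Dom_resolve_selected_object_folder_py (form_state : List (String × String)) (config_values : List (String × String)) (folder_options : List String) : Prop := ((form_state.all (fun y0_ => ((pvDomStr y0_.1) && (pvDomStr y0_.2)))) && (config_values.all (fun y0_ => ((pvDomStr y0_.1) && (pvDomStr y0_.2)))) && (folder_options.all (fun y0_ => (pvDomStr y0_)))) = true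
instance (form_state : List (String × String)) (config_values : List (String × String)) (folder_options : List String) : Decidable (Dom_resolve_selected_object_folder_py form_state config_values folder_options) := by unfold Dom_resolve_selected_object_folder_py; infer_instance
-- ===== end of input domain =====

-- B restructures A's early-return cascade into a first-defined-candidate chain and replaces the
-- sort-by-length-descending + first-match scan by filter + max(key=len) (alternative decomposition, no sort).

-- ===== PORT A =====
-- _normalize_text (dict values here are strings, so `str(value or "")` is the value itself)
def pvNorm (s : String) : String := PySem.Str.strip s
-- .strip("/")
def pvStripSlash (s : String) : String := PySem.Str.stripChars s "/"
-- _build_object_storage_base_uri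
def pvBaseUri (config_values : List (String × String)) (folder_name : String) : String :=
  let bucket_name := pvNorm ((PySem.Dict.mk config_values).getD "bucket_name" "")
  let namespace_name := pvNorm ((PySem.Dict.mk config_values).getD "namespace_name" "")
  let folder_value := pvStripSlash (pvNorm folder_name)
  if bucket_name = "" ∨ namespace_name = "" then ""
  else if folder_value ≠ "" then
    "oci://" ++ bucket_name ++ "@" ++ namespace_name ++ "/" ++ folder_value ++ "/"
  else "oci://" ++ bucket_name ++ "@" ++ namespace_name ++ "/"

def resolve_selected_object_folder_py (form_state : List (String × String)) (config_values : List (String × String)) (folder_options : List String) : String :=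
  let selected_folder := pvStripSlash (pvNorm ((PySem.Dict.mk form_state).getD "selected_object_folder" ""))
  if selected_folder ≠ "" then selected_folder
  else
    let oci_uri := pvNorm ((PySem.Dict.mk form_state).getD "oci_uri" "")
    let base_uri := pvBaseUri config_values ""
    -- the for-loop `return folder_option` is the first match of the ordered list
    let hit : Option String :=
      if base_uri ≠ "" ∧ PySem.Str.startswith oci_uri base_uri = true then
        let uri_path := pvStripSlash (PySem.Str.slice oci_uri (some (PySem.Str.len base_uri)) none)
        (PySem.List.sorted folder_options (fun f => PySem.Str.len f) true).find?
          (fun f => uri_path == f || PySem.Str.startswith uri_path (f ++ "/"))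
      else none
    match hit with
    | some f => f
    | none =>
      let configured_prefix := pvStripSlash (pvNorm ((PySem.Dict.mk config_values).getD "base_folder" ""))
      if configured_prefix ≠ "" then configured_prefix
      else (match folder_options with | [] => "" | f :: _ => f)

-- ===== PORT B =====
-- _text
def bText (s : String) : String := PySem.Str.strip s
-- _trim
def bTrim (s : String) : String := PySem.Str.stripChars (PySem.Str.strip s) "/"
-- _base_uri
def bBaseUri (config_values : List (String × String)) : String :=
  let bucket := bText ((PySem.Dict.mk config_values).getD "bucket_name" "")
  let ns_name := bText ((PySem.Dict.mk config_values).getD "namespace_name" "")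
  if bucket ≠ "" ∧ ns_name ≠ "" then "oci://" ++ bucket ++ "@" ++ ns_name ++ "/" else ""
-- _match_from_uri: list comprehension `matches` then `max(matches, key=len)` (first maximal)
def bMatchFromUri (form_state : List (String × String)) (config_values : List (String × String)) (folder_options : List String) : Option String :=
  let base := bBaseUri config_values
  let uri := bText ((PySem.Dict.mk form_state).getD "oci_uri" "")
  if base = "" ∨ ¬ (PySem.Str.startswith uri base = true) then none
  else
    let path := PySem.Str.stripChars (PySem.Str.slice uri (some (PySem.Str.len base)) none) "/"
    let ms := folder_options.filter (fun f => path == f || PySem.Str.startswith path (f ++ "/"))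
    PySem.List.max? ms (fun f => PySem.Str.len f)
-- the `for candidate in (…): if candidate is not None: return candidate` chain
def bFirst : List (Option String) → String
  | [] => ""
  | none :: rest => bFirst rest
  | some s :: _ => s

def resolve_selected_object_folder_py_alt (form_state : List (String × String)) (config_values : List (String × String)) (folder_options : List String) : String :=
  bFirst
    [ (let s := bTrim ((PySem.Dict.mk form_state).getD "selected_object_folder" "");
       if s = "" then none else some s),
      bMatchFromUri form_state config_values folder_options,
      (let c := bTrim ((PySem.Dict.mk config_values).getD "base_folder" "");
       if c = "" then none else some c),
      some (folder_options.headD "") ]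

-- ===== PRECONDITION & SPEC =====
def Spec_resolve_selected_object_folder_py (form_state : List (String × String)) (config_values : List (String × String)) (folder_options : List String) (out : String) : Prop := out = resolve_selected_object_folder_py_alt form_state config_values folder_options
instance (form_state : List (String × String)) (config_values : List (String × String)) (folder_options : List String) (out : String) : Decidable (Spec_resolve_selected_object_folder_py form_state config_values folder_options out) := by unfold Spec_resolve_selected_object_folder_py; infer_instance

-- ===== CLAIM (what is proved, stated in full; the proofs are below) =====
def Claim_equal_resolve_selected_object_folder_py : Prop := ∀ (form_state : List (String × String)) (config_values : List (String × String)) (folder_options : List String), Dom_resolve_selected_object_folder_py form_state config_values folder_options → Spec_resolve_selected_object_folder_py form_state config_values folder_options (resolve_selected_object_folder_py form_state config_values folder_options)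

-- ===== LEMMAS AND PROOFS =====

-- A's base URI with empty folder_name is B's _base_uri
theorem pvBaseUri_eq (cv : List (String × String)) : pvBaseUri cv "" = bBaseUri cv := by
  simp only [pvBaseUri, bBaseUri, bText, pvNorm]
  have h : pvStripSlash (PySem.Str.strip "") = "" := by decide
  rw [h]
  by_cases hb : PySem.Str.strip ((PySem.Dict.mk cv).getD "bucket_name" "") = "" <;>
    by_cases hn : PySem.Str.strip ((PySem.Dict.mk cv).getD "namespace_name" "") = "" <;>
      simp [hb, hn]

-- one insertion step of A's stable descending sort, seen through `find?`
theorem pvStep (p : String → Bool) (x : String) (L : List String)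
    (h : L.Pairwise (fun a b => PySem.Str.len b ≤ PySem.Str.len a)) :
    (PySem.List.insertBy (fun a b => decide (PySem.Str.len b < PySem.Str.len a)) x L).find? p
    = if p x = true then
        (if (match L.find? p with | none => true | some g => decide (PySem.Str.len g < PySem.Str.len x)) = true
         then some x else L.find? p)
      else L.find? p := by
  induction L with
  | nil =>
    rw [PySem.List.insertBy]
    by_cases hp : p x <;> simp [hp, List.find?]
  | cons y ys ih =>
    rw [List.pairwise_cons] at h
    obtain ⟨hy, hys⟩ := h
    rw [PySem.List.insertBy]
    by_cases hlt : PySem.Str.len y < PySem.Str.len x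
    · -- x is inserted in front of y
      rw [if_pos (by simpa using hlt)]
      by_cases hp : p x
      · rw [List.find?_cons_of_pos hp, if_pos hp]
        cases hfind : List.find? p (y :: ys) with
        | none => simp
        | some g =>
          have hg := List.mem_of_find?_eq_some hfind
          have hle : PySem.Str.len g ≤ PySem.Str.len y := by
            rcases List.mem_cons.mp hg with rfl | hmem
            · exact le_refl _
            · exact hy g hmem
          simp only [PySem.Str.len_eq, String.length_toList] at hle hlt
          simp
          intro hc
          exact absurd hc (by omega)
      · rw [List.find?_cons_of_neg hp, if_neg hp]
    · -- x goes past y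
      rw [if_neg (by simpa using hlt)]
      by_cases hpy : p y
      · -- first match stays y: len x ≤ len y kills the replacement condition
        rw [List.find?_cons_of_pos hpy, List.find?_cons_of_pos hpy]
        simp only [PySem.Str.len_eq, String.length_toList] at hlt
        by_cases hp : p x
        · simp [hp]
          intro hc
          exact absurd hc (by omega)
        · simp [hp]
      · rw [List.find?_cons_of_neg hpy, List.find?_cons_of_neg hpy, ih hys]

-- A's first match over the stable descending sort as a single earliest-longest fold
theorem pvCore (p : String → Bool) (xs : List String) :
    (PySem.List.sorted xs (fun f => PySem.Str.len f) true).find? p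
    = xs.foldl
        (fun b f =>
          if p f = true then
            if (match b with | none => true | some g => decide (PySem.Str.len g < PySem.Str.len f)) = true then some f else b
          else b) none := by
  induction xs using List.reverseRecOn with
  | nil => simp [PySem.List.sorted]
  | append_singleton ys x ih =>
    rw [PySem.List.sorted_rev_eq_foldl_insertBy, List.foldl_append, List.foldl_append]
    rw [← PySem.List.sorted_rev_eq_foldl_insertBy]
    simp only [List.foldl_cons, List.foldl_nil]
    rw [pvStep p x _ (PySem.List.sorted_pairwise_rev ys (fun f => PySem.Str.len f)), ih]

-- … and that fold IS B's max(key=len) over the filtered list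
theorem pvCore' (p : String → Bool) (xs : List String) :
    (PySem.List.sorted xs (fun f => PySem.Str.len f) true).find? p
    = PySem.List.max? (xs.filter p) (fun f => PySem.Str.len f) := by
  rw [pvCore, PySem.List.max?, List.foldl_filter]
  congr 1
  funext b f
  cases b <;> by_cases hp : p f <;> simp [hp]

-- A's URI-match phase is B's _match_from_uri
theorem pvMatch_eq (fs cv : List (String × String)) (fo : List String) :
    (if pvBaseUri cv "" ≠ "" ∧
        PySem.Str.startswith (pvNorm ((PySem.Dict.mk fs).getD "oci_uri" "")) (pvBaseUri cv "") = true then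
        (PySem.List.sorted fo (fun f => PySem.Str.len f) true).find?
          (fun f =>
            pvStripSlash (PySem.Str.slice (pvNorm ((PySem.Dict.mk fs).getD "oci_uri" ""))
                (some (PySem.Str.len (pvBaseUri cv ""))) none) == f ||
            PySem.Str.startswith
              (pvStripSlash (PySem.Str.slice (pvNorm ((PySem.Dict.mk fs).getD "oci_uri" ""))
                (some (PySem.Str.len (pvBaseUri cv ""))) none)) (f ++ "/"))
     else none)
    = bMatchFromUri fs cv fo := by
  simp only [bMatchFromUri, bText, pvBaseUri_eq, pvNorm, pvStripSlash]
  by_cases hb : bBaseUri cv = ""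
  · rw [if_neg (by simp [hb]), if_pos (Or.inl hb)]
  · by_cases hs : PySem.Str.startswith (PySem.Str.strip ((PySem.Dict.mk fs).getD "oci_uri" "")) (bBaseUri cv) = true
    · rw [if_pos ⟨hb, hs⟩, if_neg (fun h => h.elim hb (fun h2 => h2 hs)), pvCore']
    · rw [if_neg (fun h => hs h.2), if_pos (Or.inr hs)]

-- bTrim seen through A's helpers
theorem bTrim_eq (s : String) : pvStripSlash (pvNorm s) = bTrim s := rfl

-- ===== VERDICT (by name: the statement is the Claim_ definition above) =====
theorem resolve_selected_object_folder_py_spec : Claim_equal_resolve_selected_object_folder_py := by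
  intro fs cv fo _
  unfold Spec_resolve_selected_object_folder_py
  simp only [resolve_selected_object_folder_py, resolve_selected_object_folder_py_alt]
  rw [pvMatch_eq fs cv fo]
  simp only [bTrim_eq]
  by_cases hsel : bTrim ((PySem.Dict.mk fs).getD "selected_object_folder" "") = ""
  · rw [if_neg (by simp [hsel]), if_pos hsel]
    cases hm : bMatchFromUri fs cv fo with
    | some f => simp [bFirst]
    | none =>
      by_cases hconf : bTrim ((PySem.Dict.mk cv).getD "base_folder" "") = ""
      · rw [if_neg (by simp [hconf]), if_pos hconf]
        cases fo <;> simp [bFirst]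
      · rw [if_pos hconf, if_neg hconf]
        simp [bFirst]
  · rw [if_pos hsel, if_neg hsel]
    simp [bFirst]
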